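-- pv_equiv track=rewrite | github.com/jonajo15/Advent-of-Code-21 | days/12/main.py | check_occurences
-- ===== SOURCE A (Python) =====
-- def check_occurences(caves):
--     occ = dict()
--     once = False
--
--     for cave in caves:
--         if cave.islower():
--             if cave in occ:
--                 if not once:
--                     once = True
--                 else:
--                     return True
--             else:
--                 occ[cave] = 1
--
--     return False
-- ===== SOURCE B (Python) =====
-- def check_occurences(caves):
--     lower = [c for c in caves if c.islower()]
--     return len(lower) - len(set(lower)) >= 2
-- ===== Notes on version B (the rewrite author's own statement) =====
-- stated objective: simpler
-- what changed: Replaced A's single-pass dict-and-flag bookkeeping with early return by a two-phase reduction: collect the lowercase caves, then compare total visits minus distinct caves against 2.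
import Mathlib
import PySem

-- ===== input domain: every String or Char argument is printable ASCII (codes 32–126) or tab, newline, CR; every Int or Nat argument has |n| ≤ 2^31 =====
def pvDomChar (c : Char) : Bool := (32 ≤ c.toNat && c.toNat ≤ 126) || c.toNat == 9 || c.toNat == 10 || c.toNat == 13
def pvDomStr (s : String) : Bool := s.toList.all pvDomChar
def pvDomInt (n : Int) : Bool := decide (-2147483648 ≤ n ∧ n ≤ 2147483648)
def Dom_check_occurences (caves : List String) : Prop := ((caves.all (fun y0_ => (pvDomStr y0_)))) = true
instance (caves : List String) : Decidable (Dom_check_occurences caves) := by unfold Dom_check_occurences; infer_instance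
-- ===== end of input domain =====

-- B replaces A's dict-and-flag single pass (with early return) by a count-then-compare
-- reduction: total lowercase visits minus distinct lowercase caves ≥ 2.

-- shared helper: Python's str.islower() on the ASCII domain — some cased (letter) char and no uppercase one
def pyStrIslower (s : String) : Bool :=
  s.toList.any (fun c => PySem.Chars.isalpha c) && s.toList.all (fun c => !PySem.Chars.isupper c)

-- ===== PORT A =====
def checkOccLoop : List String → PySem.Dict String Int → Bool → Bool
  | [], _, _ => false
  | cave :: rest, occ, once =>
    if pyStrIslower cave then
      if occ.contains cave then
        if !once then checkOccLoop rest occ true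
        else true
      else checkOccLoop rest (occ.insert cave 1) once
    else checkOccLoop rest occ once

def check_occurences (caves : List String) : Bool :=
  checkOccLoop caves PySem.Dict.empty false

-- ===== PORT B =====
def check_occurences_alt (caves : List String) : Bool :=
  let lower := caves.filter pyStrIslower
  decide (2 ≤ (lower.length : Int) - (PySem.Set.ofList lower).length)

-- ===== PRECONDITION & SPEC =====
def Spec_check_occurences (caves : List String) (out : Bool) : Prop := out = check_occurences_alt caves
instance (caves : List String) (out : Bool) : Decidable (Spec_check_occurences caves out) := by unfold Spec_check_occurences; infer_instance

-- ===== CLAIM (what is proved, stated in full; the proofs are below) =====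
def Claim_equal_check_occurences : Prop := ∀ (caves : List String), Dom_check_occurences caves → Spec_check_occurences caves (check_occurences caves)

-- ===== LEMMAS AND PROOFS =====

-- number of duplicate lowercase caves in xs relative to the already-seen set s
def dups : List String → PySem.Set String → Nat
  | [], _ => 0
  | c :: r, s =>
    if pyStrIslower c then
      if s.contains c then 1 + dups r s else dups r (PySem.Set.add s c)
    else dups r s

theorem dups_cons (c : String) (r : List String) (s : PySem.Set String) :
    dups (c :: r) s = if pyStrIslower c then
      (if PySem.Set.contains s c then 1 + dups r s else dups r (PySem.Set.add s c))
    else dups r s := rfl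

theorem checkOccLoop_eq_dups (xs : List String) :
    ∀ (occ : PySem.Dict String Int) (once : Bool),
      checkOccLoop xs occ once = decide (2 ≤ (if once then 1 else 0) + dups xs occ.keys) := by
  induction xs with
  | nil =>
    intro occ once
    cases once <;> simp [checkOccLoop, dups]
  | cons c r ih =>
    intro occ once
    by_cases hl : pyStrIslower c = true
    · by_cases hc : occ.contains c = true
      · have hk : PySem.Set.contains occ.keys c = true := by
          rw [PySem.Dict.contains_eq_decide_mem_keys] at hc
          simp only [PySem.Set.contains, List.contains_eq_mem]
          simpa using hc
        cases once with
        | false =>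
          simp only [checkOccLoop, hl, hc, if_true, Bool.not_false]
          rw [ih occ true]
          simp only [dups_cons, hl, hk, if_true, if_false, Bool.false_eq_true]
          rw [decide_eq_decide]
          omega
        | true =>
          simp only [checkOccLoop, hl, hc, if_true, Bool.not_true, Bool.false_eq_true, if_false]
          simp only [dups_cons, hl, hk, if_true]
          rw [eq_comm, decide_eq_true_iff]
          omega
      · have hc' : occ.contains c = false := by simpa using hc
        have hk : PySem.Set.contains occ.keys c = false := by
          rw [PySem.Dict.contains_eq_decide_mem_keys] at hc'
          simp only [PySem.Set.contains, List.contains_eq_mem]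
          simpa using hc'
        have hm : c ∉ occ.keys := by
          rw [PySem.Dict.contains_eq_decide_mem_keys] at hc'
          simpa using hc'
        have hkeys : (occ.insert c 1).keys = PySem.Set.add occ.keys c := by
          rw [PySem.Dict.keys_insert_of_not_contains occ 1 hc']
          simp [PySem.Set.add, hm]
        simp only [checkOccLoop, hl, hc', if_true, Bool.false_eq_true, if_false]
        rw [ih (occ.insert c 1) once, hkeys]
        simp only [dups_cons, hl, hk, if_true, Bool.false_eq_true, if_false]
    · have hl' : pyStrIslower c = false := by simpa using hl
      simp only [checkOccLoop, hl', Bool.false_eq_true, if_false]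
      rw [ih occ once]
      simp only [dups_cons, hl', Bool.false_eq_true, if_false]

theorem dups_add_update (xs : List String) :
    ∀ (s : PySem.Set String),
      dups xs s + (PySem.Set.update s (xs.filter pyStrIslower)).length
        = (xs.filter pyStrIslower).length + s.length := by
  induction xs with
  | nil => intro s; simp [dups, PySem.Set.update]
  | cons c r ih =>
    intro s
    by_cases hl : pyStrIslower c = true
    · by_cases hc : PySem.Set.contains s c = true
      · have hm : c ∈ s := by simpa [PySem.Set.contains] using hc
        have hadd : PySem.Set.add s c = s := by simp [PySem.Set.add, hm]
        simp only [dups_cons, hl, hc, if_true, List.filter_cons_of_pos hl,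
          PySem.Set.update_cons, hadd, List.length_cons]
        have := ih s
        omega
      · have hc' : PySem.Set.contains s c = false := by simpa using hc
        have hm : c ∉ s := by simpa [PySem.Set.contains] using hc'
        have hlen : (PySem.Set.add s c).length = s.length + 1 := by
          simp [PySem.Set.add, hm]
        simp only [dups_cons, hl, hc', if_true, Bool.false_eq_true, if_false,
          List.filter_cons_of_pos hl, PySem.Set.update_cons, List.length_cons]
        have := ih (PySem.Set.add s c)
        omega
    · have hl' : pyStrIslower c = false := by simpa using hl
      simp only [dups_cons, hl', Bool.false_eq_true, if_false, List.filter_cons]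
      rw [ih s]

-- ===== VERDICT (by name: the statement is the Claim_ definition above) =====
theorem check_occurences_spec : Claim_equal_check_occurences := by
  intro caves _
  unfold Spec_check_occurences check_occurences check_occurences_alt
  rw [checkOccLoop_eq_dups caves PySem.Dict.empty false]
  have hkeys : (PySem.Dict.empty : PySem.Dict String Int).keys = ([] : List String) := rfl
  rw [hkeys]
  have h := dups_add_update caves ([] : PySem.Set String)
  rw [PySem.Set.update_nil_left] at h
  simp only [List.length_nil, Nat.add_zero] at h
  have hle : (PySem.Set.ofList (caves.filter pyStrIslower)).length
      ≤ (caves.filter pyStrIslower).length :=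
    PySem.Set.length_ofList_le _
  simp only [if_false, Bool.false_eq_true, Nat.zero_add]
  rw [decide_eq_decide]
  omega
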